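-- pv_equiv track=rewrite | github.com/exerciselibrary/rogue_garmin_bridge | src/fit/device_identification.py | _match_device_name
-- ===== SOURCE A (Python) =====
-- from typing import Dict, Any, Optional, Tuple
--
-- def _match_device_name(device_name: str, workout_type: str) -> Optional[str]:
--     """
--     Match device name to registry key
--
--     Args:
--         device_name: Device name from Bluetooth
--         workout_type: Workout type for context
--
--     Returns:
--         Registry key or None if no match
--     """
--     device_name_lower = device_name.lower()
--
--     # Check for Rogue Echo Bike
--     if any(keyword in device_name_lower for keyword in ['rogue', 'echo']) and \
--        any(keyword in device_name_lower for keyword in ['bike', 'cycle']):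
--         return "rogue_echo_bike"
--
--     # Check for Rogue Echo Rower
--     if any(keyword in device_name_lower for keyword in ['rogue', 'echo']) and \
--        any(keyword in device_name_lower for keyword in ['rower', 'row']):
--         return "rogue_echo_rower"
--
--     # Generic matching based on workout type
--     if workout_type in ['bike', 'cycling'] and \
--        any(keyword in device_name_lower for keyword in ['bike', 'cycle']):
--         return "generic_bike"
--
--     if workout_type in ['rower', 'rowing'] and \
--        any(keyword in device_name_lower for keyword in ['rower', 'row']):
--         return "generic_rower"
--
--     return None
-- ===== SOURCE B (Python) =====
-- # Single left-to-right scan of the lowered name that classifies every keyword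
-- # occurrence into a category ('brand', 'bike', 'row'), then a category-level
-- # decision: branded names map to rogue_echo_*, otherwise the workout type's
-- # category must agree with the name's.
-- KEYWORD_CATEGORIES = [
--     ('rogue', 'brand'), ('echo', 'brand'),
--     ('bike', 'bike'), ('cycle', 'bike'),
--     ('rower', 'row'), ('row', 'row'),
-- ]
--
-- WORKOUT_CATEGORY = {'bike': 'bike', 'cycling': 'bike', 'rower': 'row', 'rowing': 'row'}
--
--
-- def _match_device_name(device_name: str, workout_type: str):
--     dn = device_name.lower()
--     found = set()
--     for i in range(len(dn)):
--         for kw, cat in KEYWORD_CATEGORIES: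
--             if dn.startswith(kw, i):
--                 found.add(cat)
--     if 'brand' in found:
--         if 'bike' in found:
--             return "rogue_echo_bike"
--         if 'row' in found:
--             return "rogue_echo_rower"
--         return None
--     wt_cat = WORKOUT_CATEGORY.get(workout_type)
--     if wt_cat is not None and wt_cat in found:
--         return "generic_" + ("bike" if wt_cat == 'bike' else "rower")
--     return None
-- ===== Notes on version B (the rewrite author's own statement) =====
-- stated objective: alternative
-- what changed: Replaced five independent substring scans plus an if-cascade by a single left-to-right scan of the lowered name that classifies every keyword occurrence into a category set ('brand'/'bike'/'row'), followed by a category-level decision (branded names vs. workout-type lookup).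
import Mathlib
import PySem

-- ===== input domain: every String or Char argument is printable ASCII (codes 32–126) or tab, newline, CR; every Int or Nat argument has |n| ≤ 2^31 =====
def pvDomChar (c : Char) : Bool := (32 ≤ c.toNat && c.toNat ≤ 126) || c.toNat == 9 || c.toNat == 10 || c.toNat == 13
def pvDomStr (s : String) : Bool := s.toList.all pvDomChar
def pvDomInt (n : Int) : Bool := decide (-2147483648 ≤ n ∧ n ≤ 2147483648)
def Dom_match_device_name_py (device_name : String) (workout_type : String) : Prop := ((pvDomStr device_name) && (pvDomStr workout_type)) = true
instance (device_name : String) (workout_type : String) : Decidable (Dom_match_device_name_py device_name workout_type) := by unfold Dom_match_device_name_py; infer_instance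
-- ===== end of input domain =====

-- B replaces A's five independent substring scans + if-cascade by ONE left-to-right scan of the
-- lowered name that classifies every keyword occurrence into a category set, then a category-level
-- decision (alternative algorithm; same asymptotic cost, not faster).

-- ===== PORT A =====
-- literal transliteration of A's branch cascade
def match_device_name_py (device_name : String) (workout_type : String) : Option String :=
  let device_name_lower := PySem.Str.lower device_name
  if (["rogue", "echo"].any (fun k => PySem.Str.isIn k device_name_lower)) &&
     (["bike", "cycle"].any (fun k => PySem.Str.isIn k device_name_lower)) then
    some "rogue_echo_bike"
  else if (["rogue", "echo"].any (fun k => PySem.Str.isIn k device_name_lower)) &&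
          (["rower", "row"].any (fun k => PySem.Str.isIn k device_name_lower)) then
    some "rogue_echo_rower"
  else if (["bike", "cycling"].contains workout_type) &&
          (["bike", "cycle"].any (fun k => PySem.Str.isIn k device_name_lower)) then
    some "generic_bike"
  else if (["rower", "rowing"].contains workout_type) &&
          (["rower", "row"].any (fun k => PySem.Str.isIn k device_name_lower)) then
    some "generic_rower"
  else
    none

-- ===== PORT B =====
-- keyword → category table (module constant KEYWORD_CATEGORIES of Source B)
def pvKeywordCategories : List (String × String) :=
  [("rogue", "brand"), ("echo", "brand"),
   ("bike", "bike"), ("cycle", "bike"),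
   ("rower", "row"), ("row", "row")]

-- WORKOUT_CATEGORY dict of Source B
def pvWorkoutCategory : PySem.Dict String String :=
  PySem.Dict.ofList [("bike", "bike"), ("cycling", "bike"), ("rower", "row"), ("rowing", "row")]

-- the scan loop of Source B: for i in range(len(dn)), for (kw, cat) in KEYWORD_CATEGORIES,
-- if dn.startswith(kw, i): found.add(cat).
-- range(len(dn)) is ported as List.range dn.length (exact: 0,…,len-1), and
-- dn.startswith(kw, i) with 0 ≤ i as kw.toList.isPrefixOf (dn.drop i) (exact on that range:
-- Python compares dn[i:i+len(kw)] with kw).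
def pvScanFound (dn : List Char) : PySem.Set String :=
  (List.range dn.length).foldl
    (fun acc i =>
      pvKeywordCategories.foldl
        (fun acc2 p => if p.1.toList.isPrefixOf (dn.drop i) then PySem.Set.add acc2 p.2 else acc2)
        acc)
    PySem.Set.empty

def match_device_name_py_alt (device_name : String) (workout_type : String) : Option String :=
  let dn := (PySem.Str.lower device_name).toList
  let found := pvScanFound dn
  if PySem.Set.contains found "brand" then
    if PySem.Set.contains found "bike" then some "rogue_echo_bike"
    else if PySem.Set.contains found "row" then some "rogue_echo_rower"
    else none
  else
    match PySem.Dict.get? pvWorkoutCategory workout_type with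
    | some wt_cat =>
        if PySem.Set.contains found wt_cat then
          some ("generic_" ++ (if wt_cat == "bike" then "bike" else "rower"))
        else none
    | none => none

-- ===== PRECONDITION & SPEC =====
def Spec_match_device_name_py (device_name : String) (workout_type : String) (out : Option String) : Prop := out = match_device_name_py_alt device_name workout_type
instance (device_name : String) (workout_type : String) (out : Option String) : Decidable (Spec_match_device_name_py device_name workout_type out) := by unfold Spec_match_device_name_py; infer_instance

-- ===== CLAIM =====
def Claim_equal_match_device_name_py : Prop := ∀ (device_name : String) (workout_type : String), Dom_match_device_name_py device_name workout_type → Spec_match_device_name_py device_name workout_type (match_device_name_py device_name workout_type)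

-- ===== LEMMAS AND PROOFS =====

-- membership in the inner fold over the keyword table
theorem pv_mem_inner (dn : List Char) (i : Nat) (kws : List (String × String))
    (acc : PySem.Set String) (c : String) :
    c ∈ kws.foldl
      (fun acc2 p => if p.1.toList.isPrefixOf (dn.drop i) then PySem.Set.add acc2 p.2 else acc2)
      acc ↔
    c ∈ acc ∨ ∃ p ∈ kws, p.2 = c ∧ p.1.toList.isPrefixOf (dn.drop i) = true := by
  induction kws generalizing acc with
  | nil => simp
  | cons hd tl ih =>
    simp only [List.foldl_cons, List.mem_cons]
    by_cases h : hd.1.toList.isPrefixOf (dn.drop i) = true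
    · rw [if_pos h, ih, PySem.Set.mem_add]
      constructor
      · rintro (⟨hc | rfl⟩ | ⟨p, hp, h2, h3⟩)
        · exact Or.inl hc
        · exact Or.inr ⟨hd, Or.inl rfl, rfl, h⟩
        · exact Or.inr ⟨p, Or.inr hp, h2, h3⟩
      · rintro (hc | ⟨p, hp | hp, h2, h3⟩)
        · exact Or.inl (Or.inl hc)
        · exact Or.inl (Or.inr (hp ▸ h2.symm))
        · exact Or.inr ⟨p, hp, h2, h3⟩
    · rw [if_neg h, ih]
      constructor
      · rintro (hc | ⟨p, hp, h2, h3⟩)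
        · exact Or.inl hc
        · exact Or.inr ⟨p, Or.inr hp, h2, h3⟩
      · rintro (hc | ⟨p, hp | hp, h2, h3⟩)
        · exact Or.inl hc
        · exact absurd (hp ▸ h3) h
        · exact Or.inr ⟨p, hp, h2, h3⟩

-- membership in the outer fold over positions
theorem pv_mem_outer (dn : List Char) (is : List Nat) (acc : PySem.Set String) (c : String) :
    c ∈ is.foldl
      (fun acc i =>
        pvKeywordCategories.foldl
          (fun acc2 p => if p.1.toList.isPrefixOf (dn.drop i) then PySem.Set.add acc2 p.2 else acc2)
          acc)
      acc ↔
    c ∈ acc ∨ ∃ p ∈ pvKeywordCategories, p.2 = c ∧ ∃ i ∈ is, p.1.toList.isPrefixOf (dn.drop i) = true := by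
  induction is generalizing acc with
  | nil => simp
  | cons hd tl ih =>
    rw [List.foldl_cons, ih, pv_mem_inner]
    constructor
    · rintro ((hc | ⟨p, hp, h2, h3⟩) | ⟨p, hp, h2, i, hi, h3⟩)
      · exact Or.inl hc
      · exact Or.inr ⟨p, hp, h2, hd, List.mem_cons_self .., h3⟩
      · exact Or.inr ⟨p, hp, h2, i, List.mem_cons_of_mem _ hi, h3⟩
    · rintro (hc | ⟨p, hp, h2, i, hi, h3⟩)
      · exact Or.inl (Or.inl hc)
      · rcases List.mem_cons.1 hi with rfl | hi
        · exact Or.inl (Or.inr ⟨p, hp, h2, h3⟩)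
        · exact Or.inr ⟨p, hp, h2, i, hi, h3⟩

-- ∃ i < len with kw prefix of drop i  ↔  isIn, for nonempty kw
theorem pv_exists_range_iff_isIn (kw dn : List Char) (hk : kw ≠ []) :
    (∃ i ∈ List.range dn.length, kw.isPrefixOf (dn.drop i) = true) ↔
    PySem.Chars.isIn kw dn = true := by
  rw [← PySem.Chars.exists_prefix_drop_iff_isIn]
  constructor
  · rintro ⟨i, _, h⟩
    exact ⟨i, List.isPrefixOf_iff_prefix.1 h⟩
  · rintro ⟨j, h⟩
    by_cases hj : j < dn.length
    · exact ⟨j, List.mem_range.2 hj, List.isPrefixOf_iff_prefix.2 h⟩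
    · exfalso
      rw [List.drop_eq_nil_of_le (le_of_not_gt hj)] at h
      exact hk (List.prefix_nil.1 h)

theorem pv_mem_scan (dn : List Char) (c : String) :
    c ∈ pvScanFound dn ↔
    ∃ p ∈ pvKeywordCategories, p.2 = c ∧ PySem.Chars.isIn p.1.toList dn = true := by
  unfold pvScanFound
  rw [pv_mem_outer]
  simp only [PySem.Set.empty, List.not_mem_nil, false_or]
  constructor
  · rintro ⟨p, hp, h2, hex⟩
    refine ⟨p, hp, h2, ?_⟩
    rw [← pv_exists_range_iff_isIn p.1.toList dn ?_]
    · exact hex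
    · fin_cases hp <;> decide
  · rintro ⟨p, hp, h2, hin⟩
    refine ⟨p, hp, h2, ?_⟩
    rw [pv_exists_range_iff_isIn p.1.toList dn ?_]
    · exact hin
    · fin_cases hp <;> decide

-- specializations to the three categories
theorem pv_brand (dn : List Char) :
    "brand" ∈ pvScanFound dn ↔
      (PySem.Chars.isIn "rogue".toList dn = true ∨ PySem.Chars.isIn "echo".toList dn = true) := by
  rw [pv_mem_scan]
  constructor
  · rintro ⟨p, hp, h2, hin⟩
    fin_cases hp <;> simp_all
  · rintro (h1 | h1)
    · exact ⟨("rogue", "brand"), by simp [pvKeywordCategories], rfl, h1⟩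
    · exact ⟨("echo", "brand"), by simp [pvKeywordCategories], rfl, h1⟩

theorem pv_bike (dn : List Char) :
    "bike" ∈ pvScanFound dn ↔
      (PySem.Chars.isIn "bike".toList dn = true ∨ PySem.Chars.isIn "cycle".toList dn = true) := by
  rw [pv_mem_scan]
  constructor
  · rintro ⟨p, hp, h2, hin⟩
    fin_cases hp <;> simp_all
  · rintro (h1 | h1)
    · exact ⟨("bike", "bike"), by simp [pvKeywordCategories], rfl, h1⟩
    · exact ⟨("cycle", "bike"), by simp [pvKeywordCategories], rfl, h1⟩

theorem pv_row (dn : List Char) :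
    "row" ∈ pvScanFound dn ↔
      (PySem.Chars.isIn "rower".toList dn = true ∨ PySem.Chars.isIn "row".toList dn = true) := by
  rw [pv_mem_scan]
  constructor
  · rintro ⟨p, hp, h2, hin⟩
    fin_cases hp <;> simp_all
  · rintro (h1 | h1)
    · exact ⟨("rower", "row"), by simp [pvKeywordCategories], rfl, h1⟩
    · exact ⟨("row", "row"), by simp [pvKeywordCategories], rfl, h1⟩

-- ===== VERDICT =====
theorem match_device_name_py_spec : Claim_equal_match_device_name_py := by
  intro d w _
  unfold Spec_match_device_name_py match_device_name_py match_device_name_py_alt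
  simp only [PySem.Str.isIn_eq, List.any_cons, List.any_nil, Bool.or_false]
  by_cases hw1 : w = "bike"
  · subst hw1
    simp only [show pvWorkoutCategory.get? "bike" = some "bike" from by decide]
    cases h1 : (PySem.Chars.isIn "rogue".toList (PySem.Str.lower d).toList || PySem.Chars.isIn "echo".toList (PySem.Str.lower d).toList) <;>
      cases h2 : (PySem.Chars.isIn "bike".toList (PySem.Str.lower d).toList || PySem.Chars.isIn "cycle".toList (PySem.Str.lower d).toList) <;>
      cases h3 : (PySem.Chars.isIn "rower".toList (PySem.Str.lower d).toList || PySem.Chars.isIn "row".toList (PySem.Str.lower d).toList) <;>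
      simp_all [pv_brand, pv_bike, pv_row]
  by_cases hw2 : w = "cycling"
  · subst hw2
    simp only [show pvWorkoutCategory.get? "cycling" = some "bike" from by decide]
    cases h1 : (PySem.Chars.isIn "rogue".toList (PySem.Str.lower d).toList || PySem.Chars.isIn "echo".toList (PySem.Str.lower d).toList) <;>
      cases h2 : (PySem.Chars.isIn "bike".toList (PySem.Str.lower d).toList || PySem.Chars.isIn "cycle".toList (PySem.Str.lower d).toList) <;>
      cases h3 : (PySem.Chars.isIn "rower".toList (PySem.Str.lower d).toList || PySem.Chars.isIn "row".toList (PySem.Str.lower d).toList) <;>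
      simp_all [pv_brand, pv_bike, pv_row]
  by_cases hw3 : w = "rower"
  · subst hw3
    simp only [show pvWorkoutCategory.get? "rower" = some "row" from by decide]
    cases h1 : (PySem.Chars.isIn "rogue".toList (PySem.Str.lower d).toList || PySem.Chars.isIn "echo".toList (PySem.Str.lower d).toList) <;>
      cases h2 : (PySem.Chars.isIn "bike".toList (PySem.Str.lower d).toList || PySem.Chars.isIn "cycle".toList (PySem.Str.lower d).toList) <;>
      cases h3 : (PySem.Chars.isIn "rower".toList (PySem.Str.lower d).toList || PySem.Chars.isIn "row".toList (PySem.Str.lower d).toList) <;>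
      simp_all [pv_brand, pv_bike, pv_row]
  by_cases hw4 : w = "rowing"
  · subst hw4
    simp only [show pvWorkoutCategory.get? "rowing" = some "row" from by decide]
    cases h1 : (PySem.Chars.isIn "rogue".toList (PySem.Str.lower d).toList || PySem.Chars.isIn "echo".toList (PySem.Str.lower d).toList) <;>
      cases h2 : (PySem.Chars.isIn "bike".toList (PySem.Str.lower d).toList || PySem.Chars.isIn "cycle".toList (PySem.Str.lower d).toList) <;>
      cases h3 : (PySem.Chars.isIn "rower".toList (PySem.Str.lower d).toList || PySem.Chars.isIn "row".toList (PySem.Str.lower d).toList) <;>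
      simp_all [pv_brand, pv_bike, pv_row]
  · have hi : pvWorkoutCategory.items = [("bike", "bike"), ("cycling", "bike"), ("rower", "row"), ("rowing", "row")] := by decide
    have e1 : ("bike" == w) = false := by simp [Ne.symm hw1]
    have e2 : ("cycling" == w) = false := by simp [Ne.symm hw2]
    have e3 : ("rower" == w) = false := by simp [Ne.symm hw3]
    have e4 : ("rowing" == w) = false := by simp [Ne.symm hw4]
    have hget : pvWorkoutCategory.get? w = none := by
      simp [PySem.Dict.get?, hi, List.find?, e1, e2, e3, e4]
    simp only [hget]
    cases h1 : (PySem.Chars.isIn "rogue".toList (PySem.Str.lower d).toList || PySem.Chars.isIn "echo".toList (PySem.Str.lower d).toList) <;>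
      cases h2 : (PySem.Chars.isIn "bike".toList (PySem.Str.lower d).toList || PySem.Chars.isIn "cycle".toList (PySem.Str.lower d).toList) <;>
      cases h3 : (PySem.Chars.isIn "rower".toList (PySem.Str.lower d).toList || PySem.Chars.isIn "row".toList (PySem.Str.lower d).toList) <;>
      simp_all [pv_brand, pv_bike, pv_row]
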